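-- pv_equiv track=rewrite | github.com/kaiqd/estrutura-de-dados | recursividade/remove_odd_digits.py | removeImpares
-- ===== SOURCE A (Python) =====
-- def removeImpares(num):
--     if num == 0:
--         return 0
--     else:
--         digito = num % 10
--         if digito % 2 != 0:
--             return removeImpares(num // 10)
--         else:
--             return removeImpares(num // 10) * 10 + digito
-- ===== SOURCE B (Python) =====
-- def removeImpares(num):
--     result = 0
--     place = 1
--     while num != 0:
--         d = num % 10
--         if d % 2 == 0:
--             result += d * place
--             place *= 10
--         num //= 10
--     return result
-- ===== Notes on version B (the rewrite author's own statement) =====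
-- stated objective: alternative
-- what changed: Replaces the recursive descent with an iterative while loop that accumulates the result with an explicit place-value multiplier advanced only on kept even digits.
-- outside the precondition, e.g. on removeImpares(-1): A raises RecursionError, B does not finish within the time limit
import Mathlib
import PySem

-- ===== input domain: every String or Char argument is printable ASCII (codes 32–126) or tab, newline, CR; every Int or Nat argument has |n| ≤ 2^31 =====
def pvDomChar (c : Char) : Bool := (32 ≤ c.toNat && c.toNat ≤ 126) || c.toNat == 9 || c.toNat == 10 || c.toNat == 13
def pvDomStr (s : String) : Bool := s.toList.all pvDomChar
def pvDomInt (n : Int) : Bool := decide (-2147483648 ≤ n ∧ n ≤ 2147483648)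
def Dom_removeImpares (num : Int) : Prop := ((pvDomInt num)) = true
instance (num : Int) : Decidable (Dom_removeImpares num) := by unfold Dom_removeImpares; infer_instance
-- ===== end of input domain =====

-- B replaces A's recursive descent by an iterative loop with an explicit place-value
-- accumulator (alternative decomposition); Pre_ restricts to nonnegative inputs, on which
-- both programs terminate (A raises RecursionError on negatives, B's loop does not terminate).
-- ===== PORT A =====
def removeImpares (num : Int) : Int :=
  if _h : num ≤ 0 then 0  -- num = 0 inside Pre_; guard only for termination
  else
    let digito := PySem.Int.mod num 10
    if PySem.Int.mod digito 2 ≠ 0 then removeImpares (PySem.Int.floordiv num 10)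
    else removeImpares (PySem.Int.floordiv num 10) * 10 + digito
termination_by num.toNat
decreasing_by
  all_goals
    rw [PySem.Int.floordiv_eq_ediv_of_pos (by norm_num)]
    omega

-- ===== PORT B =====
def removeImparesLoop (num result place : Int) : Int :=
  if _h : num ≤ 0 then result  -- loop exit num = 0 inside Pre_; guard only for termination
  else
    let d := PySem.Int.mod num 10
    if PySem.Int.mod d 2 = 0 then
      removeImparesLoop (PySem.Int.floordiv num 10) (result + d * place) (place * 10)
    else
      removeImparesLoop (PySem.Int.floordiv num 10) result place
termination_by num.toNat
decreasing_by
  all_goals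
    rw [PySem.Int.floordiv_eq_ediv_of_pos (by norm_num)]
    omega

def removeImpares_alt (num : Int) : Int := removeImparesLoop num 0 1

-- ===== PRECONDITION & SPEC =====
-- Pre_ excludes negative inputs, on which Python A raises RecursionError (and B's loop never terminates).
def Pre_removeImpares (num : Int) : Prop := 0 ≤ num
instance (num : Int) : Decidable (Pre_removeImpares num) := by unfold Pre_removeImpares; infer_instance
def pvWitness_removeImpares : Int := (2468)
def Spec_removeImpares (num : Int) (out : Int) : Prop := out = removeImpares_alt num
instance (num : Int) (out : Int) : Decidable (Spec_removeImpares num out) := by unfold Spec_removeImpares; infer_instance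

-- ===== CLAIM (what is proved, stated in full; the proofs are below) =====
def Claim_equal_removeImpares : Prop := ∀ (num : Int), Dom_removeImpares num → Pre_removeImpares num → Spec_removeImpares num (removeImpares num)

-- ===== LEMMAS AND PROOFS =====
theorem removeImparesLoop_eq (n : Nat) : ∀ (num result place : Int), num.toNat = n → 0 ≤ num →
    removeImparesLoop num result place = result + place * removeImpares num := by
  induction n using Nat.strong_induction_on with
  | _ n ih =>
    intro num result place hn hnum
    by_cases h0 : num ≤ 0
    · have : num = 0 := le_antisymm h0 hnum
      subst this
      rw [removeImparesLoop, removeImpares]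
      simp
    · have hpos : 0 < num := lt_of_not_ge h0
      have hdiv : PySem.Int.floordiv num 10 = num / 10 :=
        PySem.Int.floordiv_eq_ediv_of_pos (by norm_num)
      have hlt : (PySem.Int.floordiv num 10).toNat < n := by rw [hdiv]; omega
      have hge : 0 ≤ PySem.Int.floordiv num 10 := by rw [hdiv]; positivity
      rw [removeImparesLoop, removeImpares]
      simp only [h0, dite_false]
      by_cases he : PySem.Int.mod (PySem.Int.mod num 10) 2 = 0
      · simp only [he, ne_eq, not_true_eq_false, ite_true, ite_false, if_false, if_true]
        rw [ih _ hlt _ _ _ rfl hge]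
        ring
      · simp only [he, ne_eq, not_false_eq_true, ite_true, ite_false, if_false, if_true]
        rw [ih _ hlt _ _ _ rfl hge]

-- ===== VERDICT (by name: the statement is the Claim_ definition above) =====
theorem removeImpares_spec : Claim_equal_removeImpares := by
  intro num _ hpre
  unfold Spec_removeImpares removeImpares_alt
  rw [removeImparesLoop_eq num.toNat num 0 1 rfl hpre]
  ring
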